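-- pv_equiv track=rewrite | github.com/lessej/advent-of-code | python_2025/aoc/solutions/day12.py | into_parts
-- ===== SOURCE A (Python) =====
-- def into_parts(lines):
--     presents = []
--     trees = []
--     is_tree = False
--     for line in lines:
--         if len(line) > 4:
--             is_tree = True
--         if is_tree:
--             trees.append(line)
--         else:
--             presents.append(line)
--     return presents, trees
-- ===== SOURCE B (Python) =====
-- def into_parts(lines):
--     lines = list(lines)
--     i = next((i for i, l in enumerate(lines) if len(l) > 4), len(lines))
--     return lines[:i], lines[i:]
-- ===== Notes on version B (the rewrite author's own statement) =====
-- stated objective: simpler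
-- what changed: Replaces the sticky-boolean loop with twin appends by locating the first line longer than 4 characters and slicing the list there once.
import Mathlib
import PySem

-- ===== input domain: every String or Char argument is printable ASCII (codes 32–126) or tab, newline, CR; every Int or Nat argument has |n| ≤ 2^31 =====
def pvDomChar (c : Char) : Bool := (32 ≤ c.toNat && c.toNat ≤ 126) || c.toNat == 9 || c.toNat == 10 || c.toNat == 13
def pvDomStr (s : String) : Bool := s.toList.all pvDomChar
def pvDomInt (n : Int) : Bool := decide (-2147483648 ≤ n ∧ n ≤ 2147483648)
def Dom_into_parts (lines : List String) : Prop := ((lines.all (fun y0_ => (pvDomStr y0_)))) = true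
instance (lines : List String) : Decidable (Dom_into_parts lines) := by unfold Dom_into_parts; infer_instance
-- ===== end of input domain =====

-- B replaces A's sticky-boolean append loop by finding the first long line's index and slicing there (simpler decomposition).


-- ===== PORT A =====
-- the for-loop over `lines` with state (presents, trees, is_tree)
def intoPartsLoop (ls : List String) (presents trees : List String) (isTree : Bool) :
    List String × List String :=
  match ls with
  | [] => (presents, trees)
  | line :: rest =>
    let isTree' := if PySem.Str.len line > 4 then true else isTree
    if isTree' then intoPartsLoop rest presents (trees ++ [line]) isTree'
    else intoPartsLoop rest (presents ++ [line]) trees isTree'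

def into_parts (lines : List String) : List String × List String :=
  intoPartsLoop lines [] [] false

-- ===== PORT B =====
-- next((i for i,l in enumerate(lines) if len(l) > 4), len(lines)) ported as findIdx? with default
def into_parts_alt (lines : List String) : List String × List String :=
  let i := (lines.findIdx? (fun l => PySem.Str.len l > 4)).getD lines.length
  (lines.take i, lines.drop i)

-- ===== PRECONDITION & SPEC =====
def Spec_into_parts (lines : List String) (out : List String × List String) : Prop := out = into_parts_alt lines
instance (lines : List String) (out : List String × List String) : Decidable (Spec_into_parts lines out) := by unfold Spec_into_parts; infer_instance

-- ===== CLAIM (what is proved, stated in full; the proofs are below) =====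
def Claim_equal_into_parts : Prop := ∀ (lines : List String), Dom_into_parts lines → Spec_into_parts lines (into_parts lines)

-- ===== LEMMAS AND PROOFS =====

-- once is_tree is true, everything goes to trees
theorem intoPartsLoop_true (ls presents trees : List String) :
    intoPartsLoop ls presents trees true = (presents, trees ++ ls) := by
  induction ls generalizing trees with
  | nil => simp [intoPartsLoop]
  | cons l rest ih => simp [intoPartsLoop, ih]

theorem intoPartsLoop_false (ls presents trees : List String) :
    intoPartsLoop ls presents trees false =
      (presents ++ ls.take ((ls.findIdx? (fun l => PySem.Str.len l > 4)).getD ls.length),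
       trees ++ ls.drop ((ls.findIdx? (fun l => PySem.Str.len l > 4)).getD ls.length)) := by
  induction ls generalizing presents with
  | nil => simp [intoPartsLoop]
  | cons l rest ih =>
    by_cases h : PySem.Str.len l > 4
    · have h' : (4 : Int) < l.length := by simpa [PySem.Str.len_eq] using h
      have h'' : 4 < l.length := by exact_mod_cast h'
      simp [intoPartsLoop, List.findIdx?_cons, h', h'', intoPartsLoop_true]
    · have h' : ¬ (4 : Int) < l.length := by simpa [PySem.Str.len_eq] using h
      have h'' : ¬ 4 < l.length := by exact_mod_cast h'
      simp only [intoPartsLoop, h, if_false]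
      rw [ih]
      rw [List.findIdx?_cons]
      simp only [h, decide_false]
      cases hf : rest.findIdx? (fun l => PySem.Str.len l > 4) with
      | none => simp [List.take_succ_cons, List.drop_succ_cons]
      | some j => simp [List.take_succ_cons, List.drop_succ_cons]

-- ===== VERDICT (by name: the statement is the Claim_ definition above) =====
theorem into_parts_spec : Claim_equal_into_parts := by
  intro lines _
  show _ = _
  simp [into_parts, into_parts_alt, intoPartsLoop_false]
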